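-- pv_equiv track=rewrite | github.com/WithSecureOpenSource/dvmps | conf/py/ipv4addr.py | ipv4addr_bytes2dotdec
-- ===== SOURCE A (Python) =====
-- def ipv4addr_bytes2dotdec(ip_bytes):
--     k = 3
--     octets = []
--     while k >= 0:
--         o = str((ip_bytes >> (8 * k)) & 255)
--         octets.append(o)
--         k = k - 1
--     return '.'.join(octets)
-- ===== SOURCE B (Python) =====
-- def ipv4addr_bytes2dotdec(ip_bytes):
--     def split(v, bits):
--         if bits == 8:
--             return [str(v)]
--         half = bits // 2
--         return split(v >> half, half) + split(v & ((1 << half) - 1), half)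
--     return '.'.join(split(ip_bytes & 0xFFFFFFFF, 32))
-- ===== Notes on version B (the rewrite author's own statement) =====
-- stated objective: alternative
-- what changed: B masks the input to a four-octet word once and then splits it by divide-and-conquer recursion (word -> two halves -> four single-octet leaves, each stringified at the leaf), instead of A's linear while-loop that indexes each octet by a fixed shift offset.
import Mathlib
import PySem

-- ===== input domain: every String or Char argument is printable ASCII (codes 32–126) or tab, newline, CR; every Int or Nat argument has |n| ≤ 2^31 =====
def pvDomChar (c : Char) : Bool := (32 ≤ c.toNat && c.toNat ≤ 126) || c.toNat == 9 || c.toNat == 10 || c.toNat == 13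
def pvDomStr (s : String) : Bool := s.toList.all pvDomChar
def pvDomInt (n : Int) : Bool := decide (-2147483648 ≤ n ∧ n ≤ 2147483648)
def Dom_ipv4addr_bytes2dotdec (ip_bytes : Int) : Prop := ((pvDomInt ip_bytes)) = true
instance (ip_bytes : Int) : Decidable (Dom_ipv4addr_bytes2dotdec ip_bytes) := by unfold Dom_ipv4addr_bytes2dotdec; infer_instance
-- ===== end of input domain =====

-- B masks the value to a four-octet word once and splits it by divide-and-conquer recursion
-- into halves down to single-octet leaves, instead of A's linear loop indexing octets by
-- fixed shift offsets; same cost, genuinely different decomposition.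

-- ===== PORT A =====
-- while k >= 0: octets.append(str((ip_bytes >> (8*k)) & 255)); k -= 1
def pvAGo (ip_bytes : Int) (k : Int) (octets : List String) : List String :=
  if 0 ≤ k then
    pvAGo ip_bytes (k - 1)
      (octets ++ [PySem.Int.toStr (PySem.Int.band (ip_bytes >>> (8 * k).toNat) 255)])
  else octets
termination_by (k + 1).toNat
decreasing_by omega

def ipv4addr_bytes2dotdec (ip_bytes : Int) : String :=
  PySem.Str.join "." (pvAGo ip_bytes 3 [])

-- ===== PORT B =====
-- def split(v, bits): if bits == 8: return [str(v)]
--                     half = bits // 2; return split(v >> half, half) + split(v & ((1 << half) - 1), half)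
-- (the dite guard only establishes termination; from the single call site bits is 32, 16 or 8,
--  so the guard always holds on reached calls)
def pvSplit (v : Int) (bits : Nat) : List String :=
  if bits == 8 then [PySem.Int.toStr v]
  else
    if _h : bits / 2 < bits then
      pvSplit (v >>> (bits / 2)) (bits / 2) ++
        pvSplit (PySem.Int.band v (((1 : Int) <<< (bits / 2)) - 1)) (bits / 2)
    else []
termination_by bits

def ipv4addr_bytes2dotdec_alt (ip_bytes : Int) : String :=
  PySem.Str.join "." (pvSplit (PySem.Int.band ip_bytes 4294967295) 32)

-- ===== PRECONDITION & SPEC =====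
def Spec_ipv4addr_bytes2dotdec (ip_bytes : Int) (out : String) : Prop := out = ipv4addr_bytes2dotdec_alt ip_bytes
instance (ip_bytes : Int) (out : String) : Decidable (Spec_ipv4addr_bytes2dotdec ip_bytes out) := by unfold Spec_ipv4addr_bytes2dotdec; infer_instance

-- ===== CLAIM (what is proved, stated in full; the proofs are below) =====
def Claim_equal_ipv4addr_bytes2dotdec : Prop := ∀ (ip_bytes : Int), Dom_ipv4addr_bytes2dotdec ip_bytes → Spec_ipv4addr_bytes2dotdec ip_bytes (ipv4addr_bytes2dotdec ip_bytes)

-- ===== LEMMAS AND PROOFS =====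

theorem pv_nat_mask8 (n : Nat) : n &&& 255 = n % 256 := by
  have h := Nat.and_two_pow_sub_one_eq_mod n 8; norm_num at h; exact h

theorem pv_nat_mask16 (n : Nat) : n &&& 65535 = n % 65536 := by
  have h := Nat.and_two_pow_sub_one_eq_mod n 16; norm_num at h; exact h

theorem pv_nat_mask32 (n : Nat) : n &&& 4294967295 = n % 4294967296 := by
  have h := Nat.and_two_pow_sub_one_eq_mod n 32; norm_num at h; exact h

-- masking with 2^k - 1 is taking the remainder mod 2^k, on every Int
theorem pv_mask8 (y : Int) : PySem.Int.band y 255 = y % 256 := by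
  rcases le_or_gt 0 y with hy | hy
  · rw [PySem.Int.band_of_nonneg hy (by norm_num), show (255 : Int).toNat = 255 from rfl, pv_nat_mask8]
    omega
  · unfold PySem.Int.band
    rw [if_neg (by omega), if_pos (by norm_num), show (255 : Int).toNat = 255 from rfl,
      Nat.land_comm, pv_nat_mask8]
    omega

theorem pv_mask16 (y : Int) : PySem.Int.band y 65535 = y % 65536 := by
  rcases le_or_gt 0 y with hy | hy
  · rw [PySem.Int.band_of_nonneg hy (by norm_num), show (65535 : Int).toNat = 65535 from rfl, pv_nat_mask16]
    omega
  · unfold PySem.Int.band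
    rw [if_neg (by omega), if_pos (by norm_num), show (65535 : Int).toNat = 65535 from rfl,
      Nat.land_comm, pv_nat_mask16]
    omega

theorem pv_mask32 (y : Int) : PySem.Int.band y 4294967295 = y % 4294967296 := by
  rcases le_or_gt 0 y with hy | hy
  · rw [PySem.Int.band_of_nonneg hy (by norm_num), show (4294967295 : Int).toNat = 4294967295 from rfl, pv_nat_mask32]
    omega
  · unfold PySem.Int.band
    rw [if_neg (by omega), if_pos (by norm_num), show (4294967295 : Int).toNat = 4294967295 from rfl,
      Nat.land_comm, pv_nat_mask32]
    omega

theorem pv_A_eval (x : Int) : pvAGo x 3 [] =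
    [PySem.Int.toStr (PySem.Int.band (x >>> (24:Nat)) 255),
     PySem.Int.toStr (PySem.Int.band (x >>> (16:Nat)) 255),
     PySem.Int.toStr (PySem.Int.band (x >>> (8:Nat)) 255),
     PySem.Int.toStr (PySem.Int.band x 255)] := by
  rw [pvAGo, if_pos (by norm_num), pvAGo, if_pos (by norm_num),
    pvAGo, if_pos (by norm_num), pvAGo, if_pos (by norm_num),
    pvAGo, if_neg (by norm_num)]
  norm_num
  rw [show Int.toNat 24 = 24 from rfl, show Int.toNat 16 = 16 from rfl,
    show Int.toNat 8 = 8 from rfl]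
  exact ⟨rfl, rfl, rfl⟩

theorem pv_split16 (v : Int) : pvSplit v 16 =
    [PySem.Int.toStr (v >>> (8:Nat)), PySem.Int.toStr (PySem.Int.band v 255)] := by
  rw [pvSplit]
  norm_num
  simp only [show ((1:Int) <<< (8:Nat)) - 1 = 255 from by decide]
  rw [pvSplit, pvSplit]
  norm_num
  rw [pvSplit]
  norm_num

theorem pv_B_eval (x : Int) : pvSplit x 32 =
    [PySem.Int.toStr (x >>> (16:Nat) >>> (8:Nat)),
     PySem.Int.toStr (PySem.Int.band (x >>> (16:Nat)) 255),
     PySem.Int.toStr (PySem.Int.band x 65535 >>> (8:Nat)),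
     PySem.Int.toStr (PySem.Int.band (PySem.Int.band x 65535) 255)] := by
  rw [pvSplit]
  norm_num
  simp only [show ((1:Int) <<< (16:Nat)) - 1 = 65535 from by decide]
  rw [pv_split16, pv_split16]
  norm_num

-- ===== VERDICT (by name: the statement is the Claim_ definition above) =====
theorem ipv4addr_bytes2dotdec_spec : Claim_equal_ipv4addr_bytes2dotdec := by
  intro x _
  unfold Spec_ipv4addr_bytes2dotdec ipv4addr_bytes2dotdec ipv4addr_bytes2dotdec_alt
  rw [pv_A_eval, pv_B_eval]
  refine congrArg (PySem.Str.join ".") ?_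
  simp only [pv_mask8, pv_mask16, pv_mask32, Int.shiftRight_eq_div_pow]
  norm_num
  exact ⟨congrArg _ (by omega), congrArg _ (by omega), congrArg _ (by omega)⟩
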